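-- pv_equiv track=rewrite | github.com/miha-stopar/isogenies-lib | sage/montgomery.py | optimal_strategy_3
-- ===== SOURCE A (Python) =====
-- def optimal_strategy_3(n, p, q):
--     S = { 1: [] }
--     C = { 1: 0 }
--     for i in range(2, n+2):
--         b, cost = min(((b, C[i-b] + C[b] + b*p + (i-b)*q) for b in range(1,i)), key=lambda t: t[1])
--         S[i] = [b] + S[i-b] + S[b]
--         C[i] = cost
--     return S[n+1]
-- ===== SOURCE B (Python) =====
-- def optimal_strategy_3(n, p, q):
--     # Same DP, but store only the minimizing split point B[i] and the cost C[i]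
--     # (scalars) instead of the full strategy list per index; the answer is
--     # reconstructed once at the end with an explicit stack (preorder emission).
--     C = [0, 0]  # C[1] = 0; index 0 unused
--     B = [0, 0]  # B[i] = first-minimal split point of i; indices 0,1 unused
--     for i in range(2, n + 2):
--         b = min(range(1, i), key=lambda b: C[i - b] + C[b] + b * p + (i - b) * q)
--         C.append(C[i - b] + C[b] + b * p + (i - b) * q)
--         B.append(b)
--     out = []
--     stack = [n + 1]
--     while stack:
--         i = stack.pop()
--         if i != 1:
--             b = B[i]
--             out.append(b)
--             stack.append(b)
--             stack.append(i - b)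
--     return out
-- ===== Notes on version B (the rewrite author's own statement) =====
-- stated objective: faster
-- what changed: The DP keeps only two scalar tables (cost and first-minimal split point) instead of materialising the full strategy list for every index, and the returned strategy is reconstructed once at the end with an explicit stack.
import Mathlib
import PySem

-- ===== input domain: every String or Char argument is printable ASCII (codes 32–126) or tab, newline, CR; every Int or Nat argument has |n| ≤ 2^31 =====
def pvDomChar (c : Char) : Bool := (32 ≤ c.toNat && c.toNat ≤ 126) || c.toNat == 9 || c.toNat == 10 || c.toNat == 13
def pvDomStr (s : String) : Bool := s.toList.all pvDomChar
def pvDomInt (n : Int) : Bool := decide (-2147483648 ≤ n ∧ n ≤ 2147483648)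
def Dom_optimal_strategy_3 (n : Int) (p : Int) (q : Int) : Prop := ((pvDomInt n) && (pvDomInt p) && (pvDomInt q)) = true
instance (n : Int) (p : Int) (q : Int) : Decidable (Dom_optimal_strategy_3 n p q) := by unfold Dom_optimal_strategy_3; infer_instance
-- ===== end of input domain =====

-- B stores per index only the cost and the minimizing split point (two int tables)
-- instead of a full strategy list per index, and reconstructs the answer once at
-- the end with an explicit stack; objective: faster by a constant factor (no
-- per-index list concatenation). Pre_ excludes n < 0, where A raises KeyError.

-- ===== PORT A =====
def optimal_strategy_3 (n : Int) (p : Int) (q : Int) : List Int :=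
  let S0 : PySem.Dict Int (List Int) := (PySem.Dict.empty).insert 1 []
  let C0 : PySem.Dict Int Int := (PySem.Dict.empty).insert 1 0
  let st := (PySem.List.pyRange 2 (n + 2) 1).foldl
    (fun (st : PySem.Dict Int (List Int) × PySem.Dict Int Int) i =>
      let S := st.1
      let C := st.2
      -- the generator of pairs (b, C[i-b] + C[b] + b*p + (i-b)*q); keys i-b, b are
      -- always present in C here, so getD is exact
      let prs := (PySem.List.pyRange 1 i 1).map
        (fun b => (b, C.getD (i - b) 0 + C.getD b 0 + b * p + (i - b) * q))
      -- min(..., key=lambda t: t[1]); the list is nonempty for every i in the range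
      let bc := (PySem.List.min? prs (fun t => t.2)).getD (0, 0)
      (S.insert i ([bc.1] ++ S.getD (i - bc.1) [] ++ S.getD bc.1 []), C.insert i bc.2))
    (S0, C0)
  st.1.getD (n + 1) []

-- ===== PORT B =====
-- the while-stack loop of Source B; the Lean list head is the Python list's END (the
-- stack top: append/pop work at the end), and fuel only makes the loop total —
-- under Pre_ the loop runs fewer than 2*(n+1) iterations
def altStratLoop (B : List Int) : Nat → List Int → List Int → List Int
  | 0, _, out => out
  | _ + 1, [], out => out
  | f + 1, i :: rest, out =>
      if i == 1 then altStratLoop B f rest out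
      else
        let b := PySem.List.pyGetD B i 0
        altStratLoop B f ((i - b) :: b :: rest) (out ++ [b])

def optimal_strategy_3_alt (n : Int) (p : Int) (q : Int) : List Int :=
  let t := (PySem.List.pyRange 2 (n + 2) 1).foldl
    (fun (t : List Int × List Int) i =>
      let C := t.1
      let B := t.2
      let b := (PySem.List.min? (PySem.List.pyRange 1 i 1)
        (fun b => PySem.List.pyGetD C (i - b) 0 + PySem.List.pyGetD C b 0 + b * p + (i - b) * q)).getD 0
      (C ++ [PySem.List.pyGetD C (i - b) 0 + PySem.List.pyGetD C b 0 + b * p + (i - b) * q], B ++ [b]))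
    ([0, 0], [0, 0])
  altStratLoop t.2 (2 * (n + 1)).toNat [n + 1] []

-- ===== PRECONDITION & SPEC =====
-- Pre_ excludes exactly n < 0, where the Python A raises KeyError on S[n+1].
def Pre_optimal_strategy_3 (n : Int) (p : Int) (q : Int) : Prop := 0 ≤ n
instance (n : Int) (p : Int) (q : Int) : Decidable (Pre_optimal_strategy_3 n p q) := by
  unfold Pre_optimal_strategy_3; infer_instance

def pvWitness_optimal_strategy_3 : Int × Int × Int := (3, 1, 2)

def Spec_optimal_strategy_3 (n : Int) (p : Int) (q : Int) (out : List Int) : Prop :=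
  out = optimal_strategy_3_alt n p q
instance (n : Int) (p : Int) (q : Int) (out : List Int) : Decidable (Spec_optimal_strategy_3 n p q out) := by
  unfold Spec_optimal_strategy_3; infer_instance

-- ===== CLAIM (what is proved, stated in full; the proofs are below) =====
def Claim_equal_optimal_strategy_3 : Prop := ∀ (n : Int) (p : Int) (q : Int), Dom_optimal_strategy_3 n p q → Pre_optimal_strategy_3 n p q → Spec_optimal_strategy_3 n p q (optimal_strategy_3 n p q)

-- ===== LEMMAS AND PROOFS =====

-- reference reconstruction: what the stack loop emits for one root index
def stratR (B : List Int) (i : Int) : List Int :=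
  if h : 2 ≤ i ∧ 1 ≤ PySem.List.pyGetD B i 0 ∧ PySem.List.pyGetD B i 0 < i then
    PySem.List.pyGetD B i 0 ::
      (stratR B (i - PySem.List.pyGetD B i 0) ++ stratR B (PySem.List.pyGetD B i 0))
  else []
termination_by i.toNat
decreasing_by all_goals omega


theorem min?_map {α β κ : Type} [LT κ] [DecidableLT κ] (l : List α) (f : α → β) (key : β → κ) :
    PySem.List.min? (l.map f) key = (PySem.List.min? l (fun x => key (f x))).map f := by
  have aux : ∀ (t : List α) (acc : Option α),
      List.foldl (fun acc y => match acc with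
        | none => some y
        | some m => if key y < key m then some y else some m) (acc.map f) (t.map f) =
      (List.foldl (fun acc x => match acc with
        | none => some x
        | some m => if key (f x) < key (f m) then some x else some m) acc t).map f := by
    intro t
    induction t with
    | nil => intro acc; rfl
    | cons x r ih =>
        intro acc
        simp only [List.map_cons, List.foldl_cons]
        cases acc with
        | none => exact ih (some x)
        | some m =>
            simp only [Option.map_some]
            by_cases h : key (f x) < key (f m) <;>
              simp only [h, if_true, if_false]
            · exact ih (some x)
            · exact ih (some m)
  exact aux l none

theorem min?_key_congr {α κ : Type} [LT κ] [DecidableLT κ] (l : List α) (k1 k2 : α → κ)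
    (h : ∀ x ∈ l, k1 x = k2 x) :
    PySem.List.min? l k1 = PySem.List.min? l k2 := by
  show List.foldl _ (none : Option α) _ = List.foldl _ (none : Option α) _
  have aux : ∀ (t : List α) (acc : Option α), (∀ x ∈ t, k1 x = k2 x) →
      (∀ m, acc = some m → k1 m = k2 m) →
      List.foldl (fun acc x => match acc with
        | none => some x
        | some m => if k1 x < k1 m then some x else some m) acc t =
      List.foldl (fun acc x => match acc with
        | none => some x
        | some m => if k2 x < k2 m then some x else some m) acc t := by
    intro t
    induction t with
    | nil => intro acc _ _; rfl
    | cons x r ih =>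
        intro acc ht hacc
        simp only [List.foldl_cons]
        cases acc with
        | none =>
            exact ih (some x) (fun y hy => ht y (List.mem_cons_of_mem _ hy))
              (fun m hm => by cases hm; exact ht x (List.mem_cons_self))
        | some m =>
            have hx : k1 x = k2 x := ht x (List.mem_cons_self)
            have hm : k1 m = k2 m := hacc m rfl
            dsimp only
            rw [hx, hm]
            by_cases h : k2 x < k2 m <;> simp only [h, if_true, if_false] <;>
              refine ih _ (fun y hy => ht y (List.mem_cons_of_mem _ hy)) ?_
            · intro m' hm'; cases hm'; exact hx
            · intro m' hm'; cases hm'; exact hm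
  exact aux l none h (by intro m hm; cases hm)

theorem pyGetD_append_left (xs t : List Int) (j : Int) (h0 : 0 ≤ j) (h1 : j < xs.length) :
    PySem.List.pyGetD (xs ++ t) j 0 = PySem.List.pyGetD xs j 0 := by
  rw [PySem.List.pyGetD_eq_getElem _ _ h0 (by simp; omega),
      PySem.List.pyGetD_eq_getElem _ _ h0 (by exact_mod_cast h1)]
  exact List.getElem_append_left (by omega)

theorem pyGetD_append_length (xs : List Int) (v : Int) (j : Int) (h : j = xs.length) :
    PySem.List.pyGetD (xs ++ [v]) j 0 = v := by
  subst h
  rw [PySem.List.pyGetD_eq_getElem _ _ (by positivity) (by simp)]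
  simp [List.getElem_append_right]

theorem stratR_append (B t : List Int) (j : Int) (h0 : 0 ≤ j) (h1 : j < B.length) :
    stratR (B ++ t) j = stratR B j := by
  have key : ∀ m : Nat, ∀ j : Int, j.toNat ≤ m → 0 ≤ j → j < B.length →
      stratR (B ++ t) j = stratR B j := by
    intro m
    induction m with
    | zero =>
        intro j hm h0 h1
        have hj : j = 0 := by omega
        subst hj
        conv_lhs => rw [stratR]
        conv_rhs => rw [stratR]
        rw [dif_neg (by rintro ⟨h2, -⟩; omega), dif_neg (by rintro ⟨h2, -⟩; omega)]
    | succ m ih =>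
        intro j hm h0 h1
        have hg : PySem.List.pyGetD (B ++ t) j 0 = PySem.List.pyGetD B j 0 :=
          pyGetD_append_left B t j h0 h1
        conv_lhs => rw [stratR]
        conv_rhs => rw [stratR]
        rw [hg]
        by_cases h : 2 ≤ j ∧ 1 ≤ PySem.List.pyGetD B j 0 ∧ PySem.List.pyGetD B j 0 < j
        · rw [dif_pos h, dif_pos h]
          obtain ⟨h2, hb1, hb2⟩ := h
          rw [ih (j - PySem.List.pyGetD B j 0) (by omega) (by omega) (by omega),
              ih (PySem.List.pyGetD B j 0) (by omega) (by omega) (by omega)]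
        · rw [dif_neg h, dif_neg h]
  exact key j.toNat j le_rfl h0 h1

-- the stack loop computes the flattened stratR of the stack, given the table bounds
theorem altStratLoop_eq (B : List Int)
    (Hb : ∀ j : Int, 2 ≤ j → j < B.length → 1 ≤ PySem.List.pyGetD B j 0 ∧ PySem.List.pyGetD B j 0 < j)
    (fuel : Nat) (stack out : List Int)
    (Hs : ∀ i ∈ stack, 1 ≤ i ∧ i < B.length)
    (Hf : (stack.map (fun i => 2 * i.toNat - 1)).sum ≤ fuel) :
    altStratLoop B fuel stack out = out ++ (stack.map (stratR B)).flatten := by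
  induction fuel generalizing stack out with
  | zero =>
      cases stack with
      | nil => simp [altStratLoop]
      | cons i rest =>
          exfalso
          have hi := Hs i (List.mem_cons_self)
          simp only [List.map_cons, List.sum_cons] at Hf
          omega
  | succ f ih =>
      cases stack with
      | nil => simp [altStratLoop]
      | cons i rest =>
          have hi := Hs i (List.mem_cons_self)
          simp only [List.map_cons, List.sum_cons] at Hf
          by_cases h1 : i = 1
          · subst h1
            have hs1 : stratR B 1 = [] := by
              rw [stratR, dif_neg (by rintro ⟨h2, -⟩; omega)]
            rw [altStratLoop, if_pos (by decide)]
            rw [ih rest out (fun x hx => Hs x (List.mem_cons_of_mem _ hx)) (by omega)]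
            simp [hs1]
          · have h2i : 2 ≤ i := by omega
            obtain ⟨hb1, hb2⟩ := Hb i h2i hi.2
            set b := PySem.List.pyGetD B i 0 with hbdef
            have hsi : stratR B i = b :: (stratR B (i - b) ++ stratR B b) := by
              rw [stratR, dif_pos ⟨h2i, hb1, hb2⟩]
            rw [altStratLoop, if_neg (by simpa using h1)]
            rw [ih ((i - b) :: b :: rest) (out ++ [b]) ?hs ?hf]
            · simp [hsi]
            case hs =>
              intro x hx
              simp only [List.mem_cons] at hx
              have hlen := hi.2
              rcases hx with rfl | rfl | hx
              · exact ⟨by omega, by omega⟩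
              · exact ⟨by omega, by omega⟩
              · exact Hs x (List.mem_cons_of_mem _ hx)
            case hf =>
              simp only [List.map_cons, List.sum_cons]
              omega

-- the two fold bodies, named for the invariant proof (identical to the ports' lambdas)
def stepA (p q : Int) (st : PySem.Dict Int (List Int) × PySem.Dict Int Int) (i : Int) :
    PySem.Dict Int (List Int) × PySem.Dict Int Int :=
  let S := st.1
  let C := st.2
  let prs := (PySem.List.pyRange 1 i 1).map
    (fun b => (b, C.getD (i - b) 0 + C.getD b 0 + b * p + (i - b) * q))
  let bc := (PySem.List.min? prs (fun t => t.2)).getD (0, 0)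
  (S.insert i ([bc.1] ++ S.getD (i - bc.1) [] ++ S.getD bc.1 []), C.insert i bc.2)

def stepB (p q : Int) (t : List Int × List Int) (i : Int) : List Int × List Int :=
  let C := t.1
  let B := t.2
  let b := (PySem.List.min? (PySem.List.pyRange 1 i 1)
    (fun b => PySem.List.pyGetD C (i - b) 0 + PySem.List.pyGetD C b 0 + b * p + (i - b) * q)).getD 0
  (C ++ [PySem.List.pyGetD C (i - b) 0 + PySem.List.pyGetD C b 0 + b * p + (i - b) * q], B ++ [b])

theorem portA_eq (n p q : Int) : optimal_strategy_3 n p q =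
    ((PySem.List.pyRange 2 (n + 2) 1).foldl (stepA p q)
      ((PySem.Dict.empty).insert 1 ([] : List Int), (PySem.Dict.empty).insert 1 (0 : Int))).1.getD (n + 1) [] := rfl

theorem portB_eq (n p q : Int) : optimal_strategy_3_alt n p q =
    altStratLoop ((PySem.List.pyRange 2 (n + 2) 1).foldl (stepB p q) ([0, 0], [0, 0])).2
      (2 * (n + 1)).toNat [n + 1] [] := rfl

theorem fold_inv (p q : Int) (k : Nat) :
    ((PySem.List.pyRange 2 (2 + (k : Int)) 1).foldl (stepB p q) ([0, 0], [0, 0])).1.length = k + 2 ∧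
    ((PySem.List.pyRange 2 (2 + (k : Int)) 1).foldl (stepB p q) ([0, 0], [0, 0])).2.length = k + 2 ∧
    (∀ j : Int, 1 ≤ j → j ≤ (k : Int) + 1 →
      ((PySem.List.pyRange 2 (2 + (k : Int)) 1).foldl (stepA p q)
        ((PySem.Dict.empty).insert 1 ([] : List Int), (PySem.Dict.empty).insert 1 (0 : Int))).2.getD j 0 =
      PySem.List.pyGetD ((PySem.List.pyRange 2 (2 + (k : Int)) 1).foldl (stepB p q) ([0, 0], [0, 0])).1 j 0) ∧
    (∀ j : Int, 2 ≤ j → j ≤ (k : Int) + 1 →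
      1 ≤ PySem.List.pyGetD ((PySem.List.pyRange 2 (2 + (k : Int)) 1).foldl (stepB p q) ([0, 0], [0, 0])).2 j 0 ∧
      PySem.List.pyGetD ((PySem.List.pyRange 2 (2 + (k : Int)) 1).foldl (stepB p q) ([0, 0], [0, 0])).2 j 0 < j) ∧
    (∀ j : Int, 1 ≤ j → j ≤ (k : Int) + 1 →
      ((PySem.List.pyRange 2 (2 + (k : Int)) 1).foldl (stepA p q)
        ((PySem.Dict.empty).insert 1 ([] : List Int), (PySem.Dict.empty).insert 1 (0 : Int))).1.getD j [] =
      stratR ((PySem.List.pyRange 2 (2 + (k : Int)) 1).foldl (stepB p q) ([0, 0], [0, 0])).2 j) := by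
  induction k with
  | zero =>
      rw [show ((2 : Int) + (0 : Nat) = 2) by norm_num, PySem.List.pyRange_one_eq_nil le_rfl]
      simp only [List.foldl_nil]
      refine ⟨by decide, by decide, ?_, ?_, ?_⟩
      · intro j hj1 hj2
        have : j = 1 := by omega
        subst this
        decide
      · intro j hj1 hj2; omega
      · intro j hj1 hj2
        have : j = 1 := by omega
        subst this
        rw [stratR, dif_neg (by rintro ⟨h2, -⟩; omega)]
        decide
  | succ k ih =>
      obtain ⟨h1, h2, hc2, hc3, hc4⟩ := ih
      set SB := (PySem.List.pyRange 2 (2 + (k : Int)) 1).foldl (stepB p q) ([0, 0], [0, 0]) with hSB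
      set SA := (PySem.List.pyRange 2 (2 + (k : Int)) 1).foldl (stepA p q)
        ((PySem.Dict.empty).insert 1 ([] : List Int), (PySem.Dict.empty).insert 1 (0 : Int)) with hSA
      set i : Int := 2 + (k : Int) with hidef
      have hstep : PySem.List.pyRange 2 (2 + ((k + 1 : Nat) : Int)) 1 = PySem.List.pyRange 2 i 1 ++ [i] := by
        rw [show (2 + ((k + 1 : Nat) : Int)) = i + 1 by push_cast; ring]
        exact PySem.List.pyRange_one_succ_right (by omega)
      rw [hstep]
      simp only [List.foldl_append, List.foldl_cons, List.foldl_nil, ← hSA, ← hSB]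
      have hi2 : 2 ≤ i := by omega
      -- the two inner minimizations pick the same split point
      have hkeys : ∀ b ∈ PySem.List.pyRange 1 i 1,
          SA.2.getD (i - b) 0 + SA.2.getD b 0 + b * p + (i - b) * q =
          PySem.List.pyGetD SB.1 (i - b) 0 + PySem.List.pyGetD SB.1 b 0 + b * p + (i - b) * q := by
        intro b hb
        rw [PySem.List.mem_pyRange_one] at hb
        rw [hc2 (i - b) (by omega) (by omega), hc2 b (by omega) (by omega)]
      have hmin : PySem.List.min? (PySem.List.pyRange 1 i 1)
            (fun b => SA.2.getD (i - b) 0 + SA.2.getD b 0 + b * p + (i - b) * q) =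
          PySem.List.min? (PySem.List.pyRange 1 i 1)
            (fun b => PySem.List.pyGetD SB.1 (i - b) 0 + PySem.List.pyGetD SB.1 b 0 + b * p + (i - b) * q) :=
        min?_key_congr _ _ _ hkeys
      obtain ⟨b0, hb0⟩ : ∃ b0, PySem.List.min? (PySem.List.pyRange 1 i 1)
          (fun b => PySem.List.pyGetD SB.1 (i - b) 0 + PySem.List.pyGetD SB.1 b 0 + b * p + (i - b) * q) = some b0 := by
        cases hm : PySem.List.min? (PySem.List.pyRange 1 i 1)
            (fun b => PySem.List.pyGetD SB.1 (i - b) 0 + PySem.List.pyGetD SB.1 b 0 + b * p + (i - b) * q) with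
        | none =>
            rw [PySem.List.min?_eq_none_iff] at hm
            have : (1 : Int) ∈ PySem.List.pyRange 1 i 1 := by
              rw [PySem.List.mem_pyRange_one]; omega
            rw [hm] at this
            exact absurd this (List.not_mem_nil)
        | some b0 => exact ⟨b0, rfl⟩
      have hb0mem : 1 ≤ b0 ∧ b0 < i := by
        have := PySem.List.min?_mem hb0
        rwa [PySem.List.mem_pyRange_one] at this
      have hAstep : stepA p q SA i =
          (SA.1.insert i ([b0] ++ SA.1.getD (i - b0) [] ++ SA.1.getD b0 []),
           SA.2.insert i (SA.2.getD (i - b0) 0 + SA.2.getD b0 0 + b0 * p + (i - b0) * q)) := by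
        unfold stepA
        dsimp only
        rw [min?_map (PySem.List.pyRange 1 i 1)
          (fun b => (b, SA.2.getD (i - b) 0 + SA.2.getD b 0 + b * p + (i - b) * q)) (fun t => t.2)]
        dsimp only
        rw [hmin, hb0]
        rfl
      have hBstep : stepB p q SB i =
          (SB.1 ++ [PySem.List.pyGetD SB.1 (i - b0) 0 + PySem.List.pyGetD SB.1 b0 0 + b0 * p + (i - b0) * q],
           SB.2 ++ [b0]) := by
        unfold stepB
        dsimp only
        rw [hb0]
        rfl
      rw [hAstep, hBstep]
      have hcost : SA.2.getD (i - b0) 0 + SA.2.getD b0 0 + b0 * p + (i - b0) * q =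
          PySem.List.pyGetD SB.1 (i - b0) 0 + PySem.List.pyGetD SB.1 b0 0 + b0 * p + (i - b0) * q :=
        hkeys b0 (by rw [PySem.List.mem_pyRange_one]; omega)
      have hlenC : ((SB.1.length : Int)) = i := by omega
      have hlenB : ((SB.2.length : Int)) = i := by omega
      refine ⟨?_, ?_, ?_, ?_, ?_⟩
      · simp [h1]
      · simp [h2]
      · intro j hj1 hj2
        dsimp only
        rw [PySem.Dict.getD_insert]
        by_cases hji : j = i
        · subst hji
          rw [if_pos rfl, pyGetD_append_length _ _ _ hlenC.symm, hcost]
        · rw [if_neg hji, pyGetD_append_left _ _ _ (by omega) (by omega)]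
          exact hc2 j hj1 (by push_cast at hj2 ⊢; omega)
      · intro j hj1 hj2
        dsimp only
        by_cases hji : j = i
        · subst hji
          rw [pyGetD_append_length _ _ _ hlenB.symm]
          exact hb0mem
        · rw [pyGetD_append_left _ _ _ (by omega) (by omega)]
          exact hc3 j hj1 (by push_cast at hj2 ⊢; omega)
      · intro j hj1 hj2
        dsimp only
        rw [PySem.Dict.getD_insert]
        by_cases hji : j = i
        · subst hji
          rw [if_pos rfl]
          have hget : PySem.List.pyGetD (SB.2 ++ [b0]) i 0 = b0 :=
            pyGetD_append_length _ _ _ hlenB.symm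
          conv_rhs => rw [stratR]
          rw [hget] at *
          rw [dif_pos ⟨hi2, hb0mem.1, hb0mem.2⟩, hget]
          rw [stratR_append _ _ _ (by omega) (by omega), stratR_append _ _ _ (by omega) (by omega)]
          rw [← hc4 (i - b0) (by omega) (by omega), ← hc4 b0 (by omega) (by omega)]
          simp
        · rw [if_neg hji, stratR_append _ _ _ (by omega) (by omega)]
          exact hc4 j hj1 (by push_cast at hj2 ⊢; omega)

-- ===== VERDICT (by name: the statement is the Claim_ definition above) =====
theorem optimal_strategy_3_spec : Claim_equal_optimal_strategy_3 := by
  intro n p q hdom hpre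
  unfold Spec_optimal_strategy_3
  have hk : n = ((n.toNat : Nat) : Int) := by
    unfold Pre_optimal_strategy_3 at hpre; omega
  set k := n.toNat with hkdef
  obtain ⟨h1, h2, hc2, hc3, hc4⟩ := fold_inv p q k
  have hrange : (n + 2) = 2 + (k : Int) := by omega
  rw [portA_eq, portB_eq, hrange]
  set BB := ((PySem.List.pyRange 2 (2 + (k : Int)) 1).foldl (stepB p q) ([0, 0], [0, 0])).2 with hBB
  have hA : ((PySem.List.pyRange 2 (2 + (k : Int)) 1).foldl (stepA p q)
      ((PySem.Dict.empty).insert 1 ([] : List Int), (PySem.Dict.empty).insert 1 (0 : Int))).1.getD (n + 1) [] =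
      stratR BB (n + 1) := hc4 (n + 1) (by omega) (by omega)
  have hB : altStratLoop BB (2 * (n + 1)).toNat [n + 1] [] = [] ++ ([n + 1].map (stratR BB)).flatten := by
    apply altStratLoop_eq
    · intro j hj2 hjlen
      exact hc3 j hj2 (by omega)
    · intro i hi
      simp only [List.mem_cons, List.not_mem_nil, or_false] at hi
      subst hi
      exact ⟨by omega, by omega⟩
    · simp only [List.map_cons, List.map_nil, List.sum_cons, List.sum_nil]
      omega
  rw [hA, hB]
  simp
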